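-- pv_equiv track=rewrite | github.com/yjk-bertrand/AligerA | aligera_scripts/STEP5_scripts.py | check_paralogy_incompatibility_comp
-- ===== SOURCE A (Python) =====
-- import itertools
--
-- def check_paralogy_incompatibility_comp(comp_1, comp_2, paralog_pairs):
--     """
--     Function that scan the component to verify that adding
--     a new component does not add a paralog to the component
--     """
--     result = True
--     possible_combinations = list(itertools.product(comp_1, comp_2))
--     for item in possible_combinations:
--         if tuple(sorted(item)) in paralog_pairs:
--             result = False
--             break
--     return result
-- ===== SOURCE B (Python) =====
-- def check_paralogy_incompatibility_comp(comp_1, comp_2, paralog_pairs):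
--     """
--     Function that scan the component to verify that adding
--     a new component does not add a paralog to the component
--     """
--     cross = {tuple(sorted((x, y))) for x in comp_1 for y in comp_2}
--     return not any(tuple(pair) in cross for pair in paralog_pairs)
-- ===== Notes on version B (the rewrite author's own statement) =====
-- stated objective: alternative
-- what changed: A enumerates every cross pair of comp_1 x comp_2 and scans the paralog_pairs list for each; B inverts the traversal: it builds the set of sorted cross pairs once and makes a single pass over paralog_pairs with set lookups.
import Mathlib
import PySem

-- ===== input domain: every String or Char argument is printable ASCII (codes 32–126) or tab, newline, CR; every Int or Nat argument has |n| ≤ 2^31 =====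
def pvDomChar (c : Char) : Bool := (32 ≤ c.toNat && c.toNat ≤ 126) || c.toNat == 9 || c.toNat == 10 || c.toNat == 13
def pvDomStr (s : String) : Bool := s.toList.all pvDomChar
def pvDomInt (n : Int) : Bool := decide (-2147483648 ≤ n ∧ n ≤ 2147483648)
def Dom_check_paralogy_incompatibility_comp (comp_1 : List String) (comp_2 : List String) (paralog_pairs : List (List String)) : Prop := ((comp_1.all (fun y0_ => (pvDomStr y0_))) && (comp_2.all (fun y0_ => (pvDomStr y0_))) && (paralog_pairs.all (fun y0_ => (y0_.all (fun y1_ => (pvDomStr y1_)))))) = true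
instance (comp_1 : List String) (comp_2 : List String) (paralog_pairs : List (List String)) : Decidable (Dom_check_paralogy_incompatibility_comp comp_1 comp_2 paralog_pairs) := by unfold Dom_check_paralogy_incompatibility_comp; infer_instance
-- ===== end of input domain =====

-- B inverts A's traversal: it builds the set of sorted cross pairs of comp_1 × comp_2 once and
-- makes a single pass over paralog_pairs against it; same result.

-- ===== PORT A =====
def pvGoA (paralog_pairs : List (List String)) : List (String × String) → Bool
  | [] => true
  | (x, y) :: rest =>
    if paralog_pairs.contains (PySem.List.sorted [x, y] (fun s => s)) then false
    else pvGoA paralog_pairs rest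

def check_paralogy_incompatibility_comp (comp_1 : List String) (comp_2 : List String) (paralog_pairs : List (List String)) : Bool :=
  pvGoA paralog_pairs (comp_1.flatMap (fun x => comp_2.map (fun y => (x, y))))

-- ===== PORT B =====
-- the set comprehension {tuple(sorted((x, y))) for x in comp_1 for y in comp_2}
def pvCross (comp_1 comp_2 : List String) : PySem.Set (List String) :=
  PySem.Set.ofList (comp_1.flatMap (fun x => comp_2.map (fun y => PySem.List.sorted [x, y] (fun s => s))))

def check_paralogy_incompatibility_comp_alt (comp_1 : List String) (comp_2 : List String) (paralog_pairs : List (List String)) : Bool :=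
  !(paralog_pairs.any (fun pair => PySem.Set.contains (pvCross comp_1 comp_2) pair))

-- ===== PRECONDITION & SPEC =====
def Spec_check_paralogy_incompatibility_comp (comp_1 : List String) (comp_2 : List String) (paralog_pairs : List (List String)) (out : Bool) : Prop := out = check_paralogy_incompatibility_comp_alt comp_1 comp_2 paralog_pairs
instance (comp_1 : List String) (comp_2 : List String) (paralog_pairs : List (List String)) (out : Bool) : Decidable (Spec_check_paralogy_incompatibility_comp comp_1 comp_2 paralog_pairs out) := by unfold Spec_check_paralogy_incompatibility_comp; infer_instance

-- ===== CLAIM (what is proved, stated in full; the proofs are below) =====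
def Claim_equal_check_paralogy_incompatibility_comp : Prop := ∀ (comp_1 : List String) (comp_2 : List String) (paralog_pairs : List (List String)), Dom_check_paralogy_incompatibility_comp comp_1 comp_2 paralog_pairs → Spec_check_paralogy_incompatibility_comp comp_1 comp_2 paralog_pairs (check_paralogy_incompatibility_comp comp_1 comp_2 paralog_pairs)

-- ===== LEMMAS AND PROOFS =====

theorem pvGoA_eq_false_iff (pp : List (List String)) (l : List (String × String)) :
    pvGoA pp l = false ↔ ∃ q ∈ l, PySem.List.sorted [q.1, q.2] (fun s => s) ∈ pp := by
  induction l with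
  | nil => simp [pvGoA]
  | cons hd tl ih =>
    obtain ⟨x, y⟩ := hd
    by_cases h : pp.contains (PySem.List.sorted [x, y] (fun s => s))
    · simp only [pvGoA, h, if_true]
      exact ⟨fun _ => ⟨(x, y), List.mem_cons_self, List.contains_iff_mem.mp h⟩, fun _ => trivial⟩
    · simp only [pvGoA, h, if_false, Bool.false_eq_true, ih]
      constructor
      · rintro ⟨q, hq, hm⟩; exact ⟨q, List.mem_cons_of_mem _ hq, hm⟩
      · rintro ⟨q, hq, hm⟩
        rcases List.mem_cons.mp hq with rfl | hq'
        · exact absurd (List.contains_iff_mem.mpr hm) h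
        · exact ⟨q, hq', hm⟩

-- A returns False iff some sorted cross pair is a paralog pair.
theorem pvA_eq_false_iff (c1 c2 : List String) (pp : List (List String)) :
    check_paralogy_incompatibility_comp c1 c2 pp = false ↔
      ∃ x ∈ c1, ∃ y ∈ c2, PySem.List.sorted [x, y] (fun s => s) ∈ pp := by
  unfold check_paralogy_incompatibility_comp
  rw [pvGoA_eq_false_iff]
  constructor
  · rintro ⟨⟨x, y⟩, hq, hm⟩
    simp only [List.mem_flatMap, List.mem_map, Prod.mk.injEq] at hq
    obtain ⟨x', hx', y', hy', hx, hy⟩ := hq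
    subst hx; subst hy
    exact ⟨x', hx', y', hy', hm⟩
  · rintro ⟨x, hx, y, hy, hm⟩
    exact ⟨(x, y), by simp only [List.mem_flatMap, List.mem_map]; exact ⟨x, hx, y, hy, rfl⟩, hm⟩

-- B returns False under the same condition as A.
theorem pvB_eq_false_iff (c1 c2 : List String) (pp : List (List String)) :
    check_paralogy_incompatibility_comp_alt c1 c2 pp = false ↔
      ∃ x ∈ c1, ∃ y ∈ c2, PySem.List.sorted [x, y] (fun s => s) ∈ pp := by
  unfold check_paralogy_incompatibility_comp_alt pvCross
  simp only [Bool.not_eq_false', List.any_eq_true, PySem.Set.contains_iff,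
    PySem.Set.mem_ofList, List.mem_flatMap, List.mem_map]
  constructor
  · rintro ⟨p, hp, x, hx, y, hy, rfl⟩
    exact ⟨x, hx, y, hy, hp⟩
  · rintro ⟨x, hx, y, hy, hm⟩
    exact ⟨_, hm, x, hx, y, hy, rfl⟩

-- ===== VERDICT (by name: the statement is the Claim_ definition above) =====
theorem check_paralogy_incompatibility_comp_spec : Claim_equal_check_paralogy_incompatibility_comp := by
  intro c1 c2 pp _
  unfold Spec_check_paralogy_incompatibility_comp
  have h : check_paralogy_incompatibility_comp c1 c2 pp = false ↔
      check_paralogy_incompatibility_comp_alt c1 c2 pp = false :=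
    (pvA_eq_false_iff c1 c2 pp).trans (pvB_eq_false_iff c1 c2 pp).symm
  cases hA : check_paralogy_incompatibility_comp c1 c2 pp <;>
    cases hB : check_paralogy_incompatibility_comp_alt c1 c2 pp <;> simp_all
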